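-- pv_equiv track=rewrite | github.com/IgorVolostnov/RossvikMoscowBot | execute.py | delete_element_before_value
-- ===== SOURCE A (Python) =====
-- def delete_element_before_value(arr: str, value: str):
--     arr_element = arr.split()
--     new_arr = []
--     for item in arr_element:
--         if item != value:
--             new_arr.append(item)
--         else:
--             break
--     return new_arr
-- ===== SOURCE B (Python) =====
-- def delete_element_before_value(arr: str, value: str):
--     tokens = arr.split()
--     if value in tokens:
--         return tokens[:tokens.index(value)]
--     return tokens
-- ===== Notes on version B (the rewrite author's own statement) =====
-- stated objective: idiomatic
-- what changed: Replaces A's accumulate-until-break loop over the tokens with a locate-then-slice decomposition: find the first occurrence with list.index and return the prefix slice, or the whole token list if the value is absent; no running accumulator list is maintained.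
import Mathlib
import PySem

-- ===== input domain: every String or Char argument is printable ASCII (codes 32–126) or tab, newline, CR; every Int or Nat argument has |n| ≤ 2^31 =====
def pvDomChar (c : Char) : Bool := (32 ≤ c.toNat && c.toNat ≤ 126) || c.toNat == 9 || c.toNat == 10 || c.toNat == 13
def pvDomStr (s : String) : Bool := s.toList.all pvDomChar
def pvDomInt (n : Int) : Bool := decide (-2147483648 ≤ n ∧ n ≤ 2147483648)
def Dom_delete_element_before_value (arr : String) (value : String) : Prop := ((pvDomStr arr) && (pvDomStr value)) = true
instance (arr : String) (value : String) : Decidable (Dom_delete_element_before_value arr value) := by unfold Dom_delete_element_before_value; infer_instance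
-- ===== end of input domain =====

-- B replaces A's accumulate-until-break loop with an idiomatic locate-then-slice decomposition (list.index + prefix slice, whole list if absent); same O(n) cost.


-- ===== PORT A =====
-- loop of A: append items to new_arr until one equals value, then break
def pvLoopA : List String → List String → String → List String
  | [], acc, _ => acc
  | item :: rest, acc, value =>
    if item ≠ value then pvLoopA rest (acc ++ [item]) value else acc

def delete_element_before_value (arr : String) (value : String) : List String :=
  pvLoopA (PySem.Str.split₀ arr) [] value

-- ===== PORT B =====
-- B: tokens = arr.split(); if value in tokens: tokens[:tokens.index(value)] else tokens
def delete_element_before_value_alt (arr : String) (value : String) : List String :=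
  match PySem.List.index? (PySem.Str.split₀ arr) value with
  | some i => PySem.List.slice (PySem.Str.split₀ arr) none (some (i : Int))
  | none => PySem.Str.split₀ arr

-- ===== PRECONDITION & SPEC =====
def Spec_delete_element_before_value (arr : String) (value : String) (out : List String) : Prop := out = delete_element_before_value_alt arr value
instance (arr : String) (value : String) (out : List String) : Decidable (Spec_delete_element_before_value arr value out) := by unfold Spec_delete_element_before_value; infer_instance

-- ===== CLAIM (what is proved, stated in full; the proofs are below) =====
def Claim_equal_delete_element_before_value : Prop := ∀ (arr : String) (value : String), Dom_delete_element_before_value arr value → Spec_delete_element_before_value arr value (delete_element_before_value arr value)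

-- ===== LEMMAS AND PROOFS =====

-- ===== VERDICT (by name: the statement is the Claim_ definition above) =====
-- accumulator invariant for A's loop, phrased against B's locate-then-slice form
theorem pvLoopA_eq (value : String) : ∀ (xs acc : List String),
    pvLoopA xs acc value =
      acc ++ (match PySem.List.index? xs value with
              | some i => xs.take i
              | none => xs) := by
  intro xs
  induction xs with
  | nil => intro acc; simp [pvLoopA, PySem.List.index?]
  | cons x rest ih =>
    intro acc
    by_cases h : x = value
    · subst h
      rw [pvLoopA, if_neg (by simp), PySem.List.index?_cons_self]
      simp
    · rw [pvLoopA, if_pos h, ih, PySem.List.index?_cons_of_ne rest h]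
      cases hr : PySem.List.index? rest value with
      | none => simp
      | some i => simp

theorem delete_element_before_value_spec : Claim_equal_delete_element_before_value := by
  intro arr value _
  unfold Spec_delete_element_before_value delete_element_before_value delete_element_before_value_alt
  rw [pvLoopA_eq]
  cases h : PySem.List.index? (PySem.Str.split₀ arr) value with
  | none => simp
  | some i => exact (PySem.List.slice_to_natCast _ _).symm
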